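-- pv_equiv track=rewrite | github.com/GiroZS/Desafios-de-programacao | problemN1.py | arvores_minimas
-- ===== SOURCE A (Python) =====
-- def mdc(a, b):
--     while b:
--         a, b = b, a % b
--     return a
--
-- def arvores_minimas(N, positions):
--     positions.sort()
--
--     dif = [positions[i+1] - positions[i] for i in range(N-1)]
--
--     overall_mdc = dif[0]
--     for diff in dif[1:]:
--         overall_mdc = mdc(overall_mdc, diff)
--
--     additional_trees = 0
--     for diff in dif:
--         additional_trees += (diff // overall_mdc) - 1
--
--     return additional_trees
-- ===== SOURCE B (Python) =====
-- def _gcd(a, b):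
--     return a if b == 0 else _gcd(b, a % b)
--
-- def arvores_minimas(N, positions):
--     positions.sort()
--     base = positions[0]
--     g = 0
--     for p in positions[1:N]:
--         g = _gcd(g, p - base)
--     return (positions[N - 1] - base) // g - (N - 1)
-- ===== Notes on version B (the rewrite author's own statement) =====
-- stated objective: simpler
-- what changed: B drops the intermediate gap list and both follow-up loops: it folds a recursive gcd over offsets from the smallest position in one pass and returns the closed form (max-min)//g - (N-1) instead of summing per-gap counts.
import Mathlib
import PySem

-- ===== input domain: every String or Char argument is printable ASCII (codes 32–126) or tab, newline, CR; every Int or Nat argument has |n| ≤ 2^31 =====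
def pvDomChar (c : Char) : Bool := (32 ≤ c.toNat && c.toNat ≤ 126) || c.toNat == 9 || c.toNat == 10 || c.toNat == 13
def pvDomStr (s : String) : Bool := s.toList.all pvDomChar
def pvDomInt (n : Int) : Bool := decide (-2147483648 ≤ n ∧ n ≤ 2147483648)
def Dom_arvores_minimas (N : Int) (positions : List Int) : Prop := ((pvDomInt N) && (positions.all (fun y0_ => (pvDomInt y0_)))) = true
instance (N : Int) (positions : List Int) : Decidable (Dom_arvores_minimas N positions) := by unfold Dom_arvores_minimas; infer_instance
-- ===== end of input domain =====

-- B replaces A's gap list and its two follow-up loops by one gcd fold over offsets from the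
-- minimum plus the closed form (max-min)//g - (N-1); equivalence is about the RETURN value
-- (both A and B sort `positions` in place, the same observable mutation).

-- termination fact for the Euclid helpers (cited by name in their decreasing_by)
theorem pymod_natAbs_lt (a b : Int) (hb : ¬ b = 0) : (PySem.Int.mod a b).natAbs < b.natAbs := by
  rcases lt_or_gt_of_ne hb with h | h
  · have := PySem.Int.mod_neg_bounds a h
    omega
  · have h1 := PySem.Int.mod_eq_emod_of_pos (a := a) h
    have h2 := Int.emod_nonneg a (by omega : b ≠ 0)
    have h3 := Int.emod_lt_of_pos a h
    omega

-- ===== PORT A =====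
-- def mdc(a, b): while b: a, b = b, a % b ; return a
def mdc (a b : Int) : Int :=
  if h : b = 0 then a
  else mdc b (PySem.Int.mod a b)
termination_by b.natAbs
decreasing_by exact pymod_natAbs_lt a b h

def arvores_minimas (N : Int) (positions : List Int) : Int :=
  let s := PySem.List.sorted positions (fun x => x)
  let dif := (PySem.List.pyRange 0 (N - 1)).map
    (fun i => PySem.List.pyGetD s (i + 1) 0 - PySem.List.pyGetD s i 0)
  let overall_mdc := (PySem.List.slice dif (some 1) none).foldl mdc (PySem.List.pyGetD dif 0 0)
  dif.foldl (fun acc diff => acc + (PySem.Int.floordiv diff overall_mdc - 1)) 0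

-- ===== PORT B =====
-- def _gcd(a, b): return a if b == 0 else _gcd(b, a % b)
def gcdRec (a b : Int) : Int :=
  if h : b = 0 then a
  else gcdRec b (PySem.Int.mod a b)
termination_by b.natAbs
decreasing_by exact pymod_natAbs_lt a b h

def arvores_minimas_alt (N : Int) (positions : List Int) : Int :=
  let s := PySem.List.sorted positions (fun x => x)
  let base := PySem.List.pyGetD s 0 0
  let g := (PySem.List.slice s (some 1) (some N)).foldl (fun g p => gcdRec g (p - base)) 0
  PySem.Int.floordiv (PySem.List.pyGetD s (N - 1) 0 - base) g - (N - 1)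

-- ===== PRECONDITION & SPEC =====
-- Pre_ = exactly where A returns: N ≤ 1 or N > len(positions) raises IndexError
-- (dif[0] resp. positions[i+1]), and equal N smallest positions raise ZeroDivisionError (gcd 0).
def Pre_arvores_minimas (N : Int) (positions : List Int) : Prop :=
  2 ≤ N ∧ N ≤ (positions.length : Int) ∧
  (PySem.List.sorted positions (fun x => x)).getD 0 0 ≠
    (PySem.List.sorted positions (fun x => x)).getD (N - 1).toNat 0
instance (N : Int) (positions : List Int) : Decidable (Pre_arvores_minimas N positions) := by
  unfold Pre_arvores_minimas; infer_instance

def pvWitness_arvores_minimas : Int × List Int := (3, [0, 6, 2])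

def Spec_arvores_minimas (N : Int) (positions : List Int) (out : Int) : Prop := out = arvores_minimas_alt N positions
instance (N : Int) (positions : List Int) (out : Int) : Decidable (Spec_arvores_minimas N positions out) := by unfold Spec_arvores_minimas; infer_instance

-- ===== CLAIM (what is proved, stated in full; the proofs are below) =====
def Claim_equal_arvores_minimas : Prop := ∀ (N : Int) (positions : List Int), Dom_arvores_minimas N positions → Pre_arvores_minimas N positions → Spec_arvores_minimas N positions (arvores_minimas N positions)

-- ===== LEMMAS AND PROOFS =====

/-- Int gcd as an Int-valued binary operation. -/
def igcd (a b : Int) : Int := (Int.gcd a b : Int)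

theorem igcd_nonneg (a b : Int) : 0 ≤ igcd a b := Int.natCast_nonneg _

theorem igcd_zero_left (b : Int) (hb : 0 ≤ b) : igcd 0 b = b := by
  simp [igcd, Int.gcd, Int.natAbs_of_nonneg hb]

theorem mdc_eq_igcd (a b : Int) (ha : 0 ≤ a) (hb : 0 ≤ b) : mdc a b = igcd a b := by
  by_cases h : b = 0
  · subst h
    rw [mdc]
    simp [igcd, Int.gcd, Int.natAbs_of_nonneg ha]
  · have hbpos : 0 < b := lt_of_le_of_ne hb (Ne.symm h)
    rw [mdc]
    simp only [h, dite_false]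
    rw [mdc_eq_igcd b (PySem.Int.mod a b) hb (PySem.Int.mod_nonneg a hbpos),
      PySem.Int.mod_eq_emod_of_pos hbpos]
    unfold igcd
    rw [Int.gcd_comm b, Int.gcd_emod]
termination_by b.natAbs
decreasing_by exact pymod_natAbs_lt a b h

theorem gcdRec_eq_igcd (a b : Int) (ha : 0 ≤ a) (hb : 0 ≤ b) : gcdRec a b = igcd a b := by
  by_cases h : b = 0
  · subst h
    rw [gcdRec]
    simp [igcd, Int.gcd, Int.natAbs_of_nonneg ha]
  · have hbpos : 0 < b := lt_of_le_of_ne hb (Ne.symm h)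
    rw [gcdRec]
    simp only [h, dite_false]
    rw [gcdRec_eq_igcd b (PySem.Int.mod a b) hb (PySem.Int.mod_nonneg a hbpos),
      PySem.Int.mod_eq_emod_of_pos hbpos]
    unfold igcd
    rw [Int.gcd_comm b, Int.gcd_emod]
termination_by b.natAbs
decreasing_by exact pymod_natAbs_lt a b h

theorem foldl_mdc_eq_igcd (l : List Int) (x : Int) (hx : 0 ≤ x) (hl : ∀ y ∈ l, 0 ≤ y) :
    l.foldl mdc x = l.foldl igcd x := by
  induction l generalizing x with
  | nil => rfl
  | cons y t ih =>
    simp only [List.foldl_cons]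
    rw [mdc_eq_igcd x y hx (hl y (by simp))]
    exact ih (igcd x y) (igcd_nonneg x y) (fun z hz => hl z (by simp [hz]))

theorem foldl_gcdRec_eq_igcd (l : List Int) (x : Int) (hx : 0 ≤ x) (hl : ∀ y ∈ l, 0 ≤ y) :
    l.foldl gcdRec x = l.foldl igcd x := by
  induction l generalizing x with
  | nil => rfl
  | cons y t ih =>
    simp only [List.foldl_cons]
    rw [gcdRec_eq_igcd x y hx (hl y (by simp))]
    exact ih (igcd x y) (igcd_nonneg x y) (fun z hz => hl z (by simp [hz]))

theorem foldl_igcd_dvd (l : List Int) (x : Int) :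
    (l.foldl igcd x ∣ x) ∧ ∀ y ∈ l, l.foldl igcd x ∣ y := by
  induction l generalizing x with
  | nil => exact ⟨dvd_refl x, by simp⟩
  | cons y t ih =>
    simp only [List.foldl_cons]
    obtain ⟨h1, h2⟩ := ih (igcd x y)
    refine ⟨dvd_trans h1 (Int.gcd_dvd_left x y), ?_⟩
    intro z hz
    rcases List.mem_cons.mp hz with rfl | hz
    · exact dvd_trans h1 (Int.gcd_dvd_right x z)
    · exact h2 z hz

theorem foldl_igcd_nonneg (l : List Int) (x : Int) (hx : 0 ≤ x) : 0 ≤ l.foldl igcd x := by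
  induction l generalizing x with
  | nil => exact hx
  | cons y t ih => exact ih (igcd x y) (igcd_nonneg x y)

theorem igcd_add_of_dvd (A t d : Int) (h : A ∣ t) : igcd A (t + d) = igcd A d := by
  obtain ⟨k, rfl⟩ := h
  unfold igcd
  rw [add_comm, mul_comm, Int.gcd_add_mul_right_right]

/-- the gap list of the first n+1 sorted values, through `f j = s.getD j 0` -/
def dmap (f : Nat → Int) (n : Nat) : List Int := (List.range n).map (fun k => f (k + 1) - f k)

/-- the offset list B folds over -/
def tmap (f : Nat → Int) (n : Nat) : List Int := (List.range n).map (fun k => f (k + 1) - f 0)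

theorem dmap_succ (f : Nat → Int) (n : Nat) :
    dmap f (n + 1) = dmap f n ++ [f (n + 1) - f n] := by
  simp [dmap, List.range_succ]

theorem tmap_succ (f : Nat → Int) (n : Nat) :
    tmap f (n + 1) = tmap f n ++ [f (n + 1) - f 0] := by
  simp [tmap, List.range_succ]

/-- main gcd bridge: B's fold over offsets equals A's fold over gaps, and it divides f n - f 0. -/
theorem tfold_eq_dfold (f : Nat → Int) (n : Nat) :
    (tmap f n).foldl igcd 0 = (dmap f n).foldl igcd 0 ∧
      (dmap f n).foldl igcd 0 ∣ (f n - f 0) := by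
  induction n with
  | zero => simp [tmap, dmap]
  | succ n ih =>
    obtain ⟨heq, hdvd⟩ := ih
    rw [tmap_succ, dmap_succ, List.foldl_append, List.foldl_append, heq]
    simp only [List.foldl_cons, List.foldl_nil]
    have hstep : igcd ((dmap f n).foldl igcd 0) (f (n + 1) - f 0) =
        igcd ((dmap f n).foldl igcd 0) (f (n + 1) - f n) := by
      have : f (n + 1) - f 0 = (f n - f 0) + (f (n + 1) - f n) := by ring
      rw [this, igcd_add_of_dvd _ _ _ hdvd]
    refine ⟨hstep, ?_⟩
    have hd1 : igcd ((dmap f n).foldl igcd 0) (f (n + 1) - f n) ∣ (f n - f 0) :=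
      dvd_trans (Int.gcd_dvd_left _ _) hdvd
    have hd2 : igcd ((dmap f n).foldl igcd 0) (f (n + 1) - f n) ∣ (f (n + 1) - f n) :=
      Int.gcd_dvd_right _ _
    have : f (n + 1) - f 0 = (f n - f 0) + (f (n + 1) - f n) := by ring
    rw [this]
    exact dvd_add hd1 hd2

theorem dmap_sum (f : Nat → Int) (n : Nat) : (dmap f n).sum = f n - f 0 := by
  induction n with
  | zero => simp [dmap]
  | succ n ih => rw [dmap_succ]; simp [ih]

theorem foldl_div_sum (g : Int) (hg : 0 < g) :
    ∀ (l : List Int), (∀ d ∈ l, g ∣ d) → ∀ acc : Int,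
      l.foldl (fun acc d => acc + (PySem.Int.floordiv d g - 1)) acc =
        acc + l.sum / g - l.length := by
  intro l
  induction l with
  | nil => intro _ acc; simp
  | cons d t ih =>
    intro hdvd acc
    simp only [List.foldl_cons]
    rw [ih (fun z hz => hdvd z (by simp [hz]))]
    have hdg : g ∣ d := hdvd d (by simp)
    have hts : g ∣ t.sum := List.dvd_sum (fun z hz => hdvd z (by simp [hz]))
    obtain ⟨k, rfl⟩ := hdg
    obtain ⟨m, hm⟩ := hts
    rw [PySem.Int.floordiv_eq_ediv_of_pos hg]
    simp only [List.sum_cons, List.length_cons, hm]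
    rw [Int.mul_ediv_cancel_left k (by omega), ← mul_add,
      Int.mul_ediv_cancel_left (k + m) (by omega : g ≠ 0),
      Int.mul_ediv_cancel_left m (by omega : g ≠ 0)]
    push_cast
    ring

theorem drop_take_eq_map_range (s : List Int) (n : Nat) (h : n + 1 ≤ s.length) :
    (s.drop 1).take n = (List.range n).map (fun k => s.getD (k + 1) 0) := by
  apply List.ext_getElem
  · simp; omega
  · intro i h1 h2
    have hi : i < n := by simpa using h2
    have hlen : i + 1 < s.length := by omega
    simp [List.getD_eq_getElem?_getD, List.getElem?_eq_getElem hlen]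

-- ===== VERDICT (by name: the statement is the Claim_ definition above) =====
theorem arvores_minimas_spec : Claim_equal_arvores_minimas := by
  intro N positions _ hpre
  obtain ⟨hN2, hNlen, hne⟩ := hpre
  unfold Spec_arvores_minimas
  set s := PySem.List.sorted positions (fun x => x) with hs
  set f : Nat → Int := fun j => s.getD j 0 with hf
  set n := (N - 1).toNat with hnn
  have hslen : s.length = positions.length := PySem.List.length_sorted positions _ _
  have hn1 : 1 ≤ n := by omega
  have hNn : N - 1 = (n : Int) := by omega
  have hNeq : N = ((n + 1 : Nat) : Int) := by push_cast; omega
  have hlen : n + 1 ≤ s.length := by rw [hslen]; omega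
  have hmono : ∀ p q : Nat, p ≤ q → q < s.length → f p ≤ f q := by
    intro p q hpq hq
    have hp : p < s.length := lt_of_le_of_lt hpq hq
    simp only [hf, List.getD_eq_getElem _ _ hp, List.getD_eq_getElem _ _ hq]
    exact PySem.List.sorted_id_getElem_mono positions hpq hq
  have hd_nonneg : ∀ y ∈ dmap f n, 0 ≤ y := by
    intro y hy
    obtain ⟨k, hk, rfl⟩ := List.mem_map.mp hy
    have hk' : k < n := List.mem_range.mp hk
    have := hmono k (k + 1) (by omega) (by omega)
    omega
  have ht_nonneg : ∀ y ∈ tmap f n, 0 ≤ y := by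
    intro y hy
    obtain ⟨k, hk, rfl⟩ := List.mem_map.mp hy
    have hk' : k < n := List.mem_range.mp hk
    have := hmono 0 (k + 1) (by omega) (by omega)
    omega
  -- the gap list A builds is `dmap f n`
  have hdif : (PySem.List.pyRange 0 (N - 1)).map
      (fun i => PySem.List.pyGetD s (i + 1) 0 - PySem.List.pyGetD s i 0) = dmap f n := by
    unfold dmap
    rw [hNn, PySem.List.pyRange_zero_natCast, List.map_map]
    apply List.map_congr_left
    intro k _
    show PySem.List.pyGetD s ((k : Int) + 1) 0 - PySem.List.pyGetD s (k : Int) 0 = _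
    rw [show ((k : Int) + 1) = ((k + 1 : Nat) : Int) by push_cast; ring]
    rw [PySem.List.pyGetD_natCast, PySem.List.pyGetD_natCast]
  obtain ⟨m, hm⟩ : ∃ m, n = m + 1 := ⟨n - 1, by omega⟩
  have hcons : dmap f n = (f 1 - f 0) :: (List.range m).map (fun k => f (k + 2) - f (k + 1)) := by
    rw [hm]
    simp only [dmap, List.range_succ_eq_map, List.map_cons, List.map_map]
    rfl
  set g : Int := (dmap f n).foldl igcd 0 with hg
  have hgnn : 0 ≤ g := foldl_igcd_nonneg _ _ le_rfl
  have hgdvd : ∀ d ∈ dmap f n, g ∣ d := (foldl_igcd_dvd (dmap f n) 0).2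
  have hgspan : g ∣ f n - f 0 := (tfold_eq_dfold f n).2
  have hgpos : 0 < g := by
    rcases lt_or_eq_of_le hgnn with h | h
    · exact h
    · exfalso
      have : f n - f 0 = 0 := zero_dvd_iff.mp (h ▸ hgspan)
      have hfe : f 0 = f n := by omega
      exact hne (by simpa [hf, hnn] using hfe)
  -- A's overall_mdc equals g
  have hoverall : (PySem.List.slice (dmap f n) (some 1) none).foldl mdc
      (PySem.List.pyGetD (dmap f n) 0 0) = g := by
    rw [hcons, PySem.List.pyGetD_zero_cons, PySem.List.slice_from_one, List.tail_cons]
    have h0 : 0 ≤ f 1 - f 0 := by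
      have := hmono 0 1 (by omega) (by omega)
      omega
    have htl : ∀ y ∈ (List.range m).map (fun k => f (k + 2) - f (k + 1)), 0 ≤ y := by
      intro y hy
      obtain ⟨k, hk, rfl⟩ := List.mem_map.mp hy
      have hk' : k < m := List.mem_range.mp hk
      have := hmono (k + 1) (k + 2) (by omega) (by omega)
      omega
    rw [foldl_mdc_eq_igcd _ _ h0 htl, hg, hcons, List.foldl_cons, igcd_zero_left _ h0]
  -- value of A
  have hA : arvores_minimas N positions = (f n - f 0) / g - (n : Int) := by
    simp only [arvores_minimas, ← hs, hdif, hoverall]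
    rw [foldl_div_sum g hgpos (dmap f n) hgdvd 0, dmap_sum]
    simp [dmap]
  -- value of B
  have hB : arvores_minimas_alt N positions = (f n - f 0) / g - (n : Int) := by
    simp only [arvores_minimas_alt, ← hs]
    have hslice : PySem.List.slice s (some 1) (some N) =
        (List.range n).map (fun k => s.getD (k + 1) 0) := by
      rw [hNeq, show (1 : Int) = ((1 : Nat) : Int) by norm_num, PySem.List.slice_natCast,
        Nat.add_sub_cancel]
      exact drop_take_eq_map_range s n hlen
    rw [hslice, PySem.List.pyGetD_zero]
    have hfold : ((List.range n).map (fun k => s.getD (k + 1) 0)).foldl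
        (fun g p => gcdRec g (p - s.getD 0 0)) 0 = (tmap f n).foldl gcdRec 0 := by
      rw [List.foldl_map, tmap, List.foldl_map]
    rw [hfold, foldl_gcdRec_eq_igcd _ _ le_rfl ht_nonneg, (tfold_eq_dfold f n).1, ← hg]
    rw [hNn, PySem.List.pyGetD_natCast, PySem.Int.floordiv_eq_ediv_of_pos hgpos]
  rw [hA, hB]
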